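-- pv_equiv track=rewrite | github.com/SRI-CSL/mixed-masked-diffusion | maskedit/utils/indices.py | starts
-- ===== SOURCE A (Python) =====
-- def starts(inds):
--     count = 0
--     start = []
--     end = []
--     for component in inds:
--         for instance in component:
--             len_inst = len(instance)
--             start.append(count)
--             count += len_inst
--             end.append(count)
--     return start, end
-- ===== SOURCE B (Python) =====
-- def starts(inds):
--     # Walk the flattened instances BACKWARDS from the precomputed total length,
--     # subtracting each instance's length; then reverse the collected offsets.
--     flat = [instance for component in inds for instance in component]
--     total = sum(len(instance) for instance in flat)
--     start = []
--     end = []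
--     for instance in reversed(flat):
--         end.append(total)
--         total -= len(instance)
--         start.append(total)
--     start.reverse()
--     end.reverse()
--     return start, end
-- ===== Notes on version B (the rewrite author's own statement) =====
-- stated objective: alternative
-- what changed: Instead of A's forward loop accumulating a running prefix count, B precomputes the total length of the flattened instances and traverses them in reverse, deriving each end/start by subtracting lengths from the total (suffix sums), then reverses the collected lists.
import Mathlib
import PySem

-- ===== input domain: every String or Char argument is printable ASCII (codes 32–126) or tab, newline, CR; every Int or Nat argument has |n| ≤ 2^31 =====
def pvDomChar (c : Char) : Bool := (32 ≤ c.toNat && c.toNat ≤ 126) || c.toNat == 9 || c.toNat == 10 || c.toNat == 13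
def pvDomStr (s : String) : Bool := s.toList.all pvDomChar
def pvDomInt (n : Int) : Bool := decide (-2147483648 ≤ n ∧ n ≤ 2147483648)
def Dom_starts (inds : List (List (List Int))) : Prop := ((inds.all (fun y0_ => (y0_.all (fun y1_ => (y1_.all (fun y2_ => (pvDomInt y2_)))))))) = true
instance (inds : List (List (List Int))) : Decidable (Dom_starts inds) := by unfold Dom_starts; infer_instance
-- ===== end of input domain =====

-- B replaces A's forward loop with a running prefix count by a reverse traversal of the flattened
-- instances that subtracts lengths from the precomputed total; objective: alternative.

-- ===== PORT A =====
-- state = (count, start, end), exactly A's three variables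
def starts (inds : List (List (List Int))) : List Int × List Int :=
  let st := inds.foldl
    (fun st component => component.foldl
      (fun st instance_ =>
        let len_inst : Int := instance_.length
        (st.1 + len_inst, st.2.1 ++ [st.1], st.2.2 ++ [st.1 + len_inst]))
      st)
    ((0 : Int), ([] : List Int), ([] : List Int))
  (st.2.1, st.2.2)

-- ===== PORT B =====
-- Source B: flatten, sum the lengths, loop over reversed(flat) with state (total, start, end), reverse at the end
def starts_alt (inds : List (List (List Int))) : List Int × List Int :=
  let flat := inds.flatMap (fun component => component.map (fun instance_ => instance_))
  let total : Int := (flat.map (fun instance_ => (instance_.length : Int))).sum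
  let st := flat.reverse.foldl
    (fun st instance_ =>
      let e := st.2.2 ++ [st.1]
      let t := st.1 - (instance_.length : Int)
      (t, st.2.1 ++ [t], e))
    (total, ([] : List Int), ([] : List Int))
  (st.2.1.reverse, st.2.2.reverse)

-- ===== PRECONDITION & SPEC =====
def Spec_starts (inds : List (List (List Int))) (out : List Int × List Int) : Prop := out = starts_alt inds
instance (inds : List (List (List Int))) (out : List Int × List Int) : Decidable (Spec_starts inds out) := by unfold Spec_starts; infer_instance

-- ===== CLAIM (what is proved, stated in full; the proofs are below) =====
def Claim_equal_starts : Prop := ∀ (inds : List (List (List Int))), Dom_starts inds → Spec_starts inds (starts inds)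

-- ===== LEMMAS AND PROOFS =====

-- running totals of a list of Ints starting from c (canonical form both ports are reduced to)
def pvAccum (acc : Int) : List Int → List Int
  | [] => []
  | x :: xs => (acc + x) :: pvAccum (acc + x) xs

theorem pvAccum_append (c : Int) (L1 L2 : List Int) :
    pvAccum c (L1 ++ L2) = pvAccum c L1 ++ pvAccum (c + L1.sum) L2 := by
  induction L1 generalizing c with
  | nil => simp [pvAccum]
  | cons x xs ih => simp [pvAccum, ih, add_assoc]

theorem pvAccum_length (c : Int) (L : List Int) : (pvAccum c L).length = L.length := by
  induction L generalizing c with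
  | nil => rfl
  | cons x xs ih => simp [pvAccum, ih]

theorem pvAccum_shift (c d : Int) (L : List Int) :
    pvAccum (c + d) L = (pvAccum d L).map (fun x => x + c) := by
  induction L generalizing d with
  | nil => simp [pvAccum]
  | cons x xs ih =>
      simp only [pvAccum, List.map_cons]
      have h1 : c + d + x = c + (d + x) := by ring
      rw [h1, ih (d + x)]
      congr 1
      ring

-- one component: A's inner loop extends the state by the accumulate form, offset by the incoming count
theorem starts_inner (comp : List (List Int)) (c : Int) (s e : List Int) :
    comp.foldl
      (fun st instance_ =>
        let len_inst : Int := instance_.length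
        (st.1 + len_inst, st.2.1 ++ [st.1], st.2.2 ++ [st.1 + len_inst]))
      (c, s, e)
    = (c + (comp.map (fun instance_ => (instance_.length : Int))).sum,
       s ++ List.zipWith (fun x l => x - l)
              (pvAccum c (comp.map (fun instance_ => (instance_.length : Int))))
              (comp.map (fun instance_ => (instance_.length : Int))),
       e ++ pvAccum c (comp.map (fun instance_ => (instance_.length : Int)))) := by
  induction comp generalizing c s e with
  | nil => simp [pvAccum]
  | cons inst rest ih =>
      simp only [List.foldl_cons, List.map_cons, List.sum_cons, pvAccum, List.zipWith_cons_cons]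
      rw [ih]
      simp [add_sub_cancel_right, add_assoc]

-- the outer loop: A's whole state in terms of the flattened lengths
theorem starts_outer (inds : List (List (List Int))) (c : Int) (s e : List Int) :
    inds.foldl
      (fun st component => component.foldl
        (fun st instance_ =>
          let len_inst : Int := instance_.length
          (st.1 + len_inst, st.2.1 ++ [st.1], st.2.2 ++ [st.1 + len_inst]))
        st)
      (c, s, e)
    = (c + (inds.flatMap (fun component => component.map (fun instance_ => (instance_.length : Int)))).sum,
       s ++ List.zipWith (fun x l => x - l)
              (pvAccum c (inds.flatMap (fun component => component.map (fun instance_ => (instance_.length : Int)))))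
              (inds.flatMap (fun component => component.map (fun instance_ => (instance_.length : Int)))),
       e ++ pvAccum c (inds.flatMap (fun component => component.map (fun instance_ => (instance_.length : Int))))) := by
  induction inds generalizing c s e with
  | cons comp rest ih =>
      simp only [List.foldl_cons, List.flatMap_cons]
      rw [starts_inner, ih]
      rw [pvAccum_append]
      rw [List.zipWith_append (h := by rw [pvAccum_length])]
      simp [add_assoc]
  | nil => simp [pvAccum]

theorem pvZipExt {f g : Int → Int → Int} (h : ∀ a b, f a b = g a b) (l1 l2 : List Int) :
    List.zipWith f l1 l2 = List.zipWith g l1 l2 := by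
  induction l1 generalizing l2 with
  | nil => simp
  | cons x xs ih => cases l2 with
    | nil => simp
    | cons y ys => simp [h, ih]

theorem pvMapExt {f g : Int → Int} (h : ∀ a, f a = g a) (l : List Int) :
    List.map f l = List.map g l := by
  induction l with
  | nil => simp
  | cons x xs ih => simp [h, ih]

-- B's reverse traversal: its state in terms of the same accumulate form, reversed and shifted
theorem starts_back (F : List (List Int)) (c : Int) (s e : List Int) :
    F.reverse.foldl
      (fun st instance_ =>
        let e := st.2.2 ++ [st.1]
        let t := st.1 - (instance_.length : Int)
        (t, st.2.1 ++ [t], e))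
      (c, s, e)
    = (c - (F.map (fun instance_ => (instance_.length : Int))).sum,
       s ++ ((List.zipWith (fun x l => x - l)
               (pvAccum 0 (F.map (fun instance_ => (instance_.length : Int))))
               (F.map (fun instance_ => (instance_.length : Int)))).map
             (fun x => x + (c - (F.map (fun instance_ => (instance_.length : Int))).sum))).reverse,
       e ++ ((pvAccum 0 (F.map (fun instance_ => (instance_.length : Int)))).map
             (fun x => x + (c - (F.map (fun instance_ => (instance_.length : Int))).sum))).reverse) := by
  induction F generalizing c s e with
  | nil => simp [pvAccum]
  | cons inst rest ih =>
      simp only [List.reverse_cons, List.foldl_append, List.foldl_cons, List.foldl_nil]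
      rw [ih]
      have hsh : pvAccum ((inst.length : Int))
            (rest.map (fun instance_ => (instance_.length : Int)))
          = (pvAccum 0 (rest.map (fun instance_ => (instance_.length : Int)))).map
              (fun x => x + (inst.length : Int)) := by
        simpa using pvAccum_shift (inst.length : Int) 0 _
      simp only [List.map_cons, List.sum_cons, pvAccum, zero_add, hsh,
        List.zipWith_cons_cons, sub_self, List.reverse_cons, List.map_cons,
        List.map_map, List.zipWith_map_left, List.map_zipWith]
      refine Prod.ext (by ring) (Prod.ext ?_ ?_) <;> dsimp only <;>
        rw [show c - ((inst.length : Int)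
              + (rest.map (fun instance_ => (instance_.length : Int))).sum)
            = c - (rest.map (fun instance_ => (instance_.length : Int))).sum
              - (inst.length : Int) by ring]
      · rw [pvZipExt
            (f := fun x y => x + (inst.length : Int) - y
              + (c - (rest.map (fun instance_ => (instance_.length : Int))).sum
                 - (inst.length : Int)))
            (g := fun x y => x - y
              + (c - (rest.map (fun instance_ => (instance_.length : Int))).sum))
            (by intro a b; ring)
            (pvAccum 0 (rest.map (fun instance_ => (instance_.length : Int))))
            (rest.map (fun instance_ => (instance_.length : Int)))]
        simp [List.append_assoc]
      · rw [pvMapExt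
            (f := (fun x => x
              + (c - (rest.map (fun instance_ => (instance_.length : Int))).sum
                 - (inst.length : Int))) ∘ (fun x => x + (inst.length : Int)))
            (g := fun x => x
              + (c - (rest.map (fun instance_ => (instance_.length : Int))).sum))
            (by intro a; simp only [Function.comp]; ring)
            (pvAccum 0 (rest.map (fun instance_ => (instance_.length : Int))))]
        rw [show (inst.length : Int)
              + (c - (rest.map (fun instance_ => (instance_.length : Int))).sum
                 - (inst.length : Int))
            = c - (rest.map (fun instance_ => (instance_.length : Int))).sum by ring]
        simp [List.append_assoc]

-- ===== VERDICT (by name: the statement is the Claim_ definition above) =====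
theorem starts_spec : Claim_equal_starts := by
  intro inds _
  show starts inds = starts_alt inds
  simp only [starts, starts_alt]
  rw [starts_outer, starts_back]
  simp [List.flatMap_def]
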